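-- pv_equiv track=rewrite | github.com/Gre-mie/advent-of-code | 2024/08-Dec/main.py | split_file_to_multiple_frequency_graphs
-- ===== SOURCE A (Python) =====
-- def get_frequencies_list(file):
--     frequencies_list = []
--     for line in file:
--         for char in line:
--             if not char == '.' and not char in frequencies_list:
--                 frequencies_list.append(char)
--     return frequencies_list
--
-- def split_file_to_multiple_frequency_graphs(file):
--     frequency_graphs = {}
--     frequencies_list = get_frequencies_list(file)
--     for frequency in frequencies_list:
--         current_graph = []
--         for line in file:
--             new_line = []
--             for char in line:
--                 if char == frequency:
--                     new_line.append(char)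
--                 else:
--                     new_line.append('.')
--             current_graph.append(new_line)
--         frequency_graphs[frequency] = current_graph
--     return frequency_graphs
-- ===== SOURCE B (Python) =====
-- def get_frequencies_list(file):
--     frequencies_list = []
--     for line in file:
--         for char in line:
--             if not char == '.' and not char in frequencies_list:
--                 frequencies_list.append(char)
--     return frequencies_list
--
-- def split_file_to_multiple_frequency_graphs(file):
--     frequencies = get_frequencies_list(file)
--     frequency_graphs = {f: [['.' for _ in line] for line in file] for f in frequencies}
--     for i, line in enumerate(file):
--         for j, char in enumerate(line):
--             if char != '.':
--                 frequency_graphs[char][i][j] = char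
--     return frequency_graphs
-- ===== Notes on version B (the rewrite author's own statement) =====
-- stated objective: alternative
-- what changed: Instead of rescanning the whole grid once per frequency, B pre-allocates an all-'.' grid per frequency and makes a single indexed pass over the input, writing each non-'.' character only into its own frequency's grid.
import Mathlib
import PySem

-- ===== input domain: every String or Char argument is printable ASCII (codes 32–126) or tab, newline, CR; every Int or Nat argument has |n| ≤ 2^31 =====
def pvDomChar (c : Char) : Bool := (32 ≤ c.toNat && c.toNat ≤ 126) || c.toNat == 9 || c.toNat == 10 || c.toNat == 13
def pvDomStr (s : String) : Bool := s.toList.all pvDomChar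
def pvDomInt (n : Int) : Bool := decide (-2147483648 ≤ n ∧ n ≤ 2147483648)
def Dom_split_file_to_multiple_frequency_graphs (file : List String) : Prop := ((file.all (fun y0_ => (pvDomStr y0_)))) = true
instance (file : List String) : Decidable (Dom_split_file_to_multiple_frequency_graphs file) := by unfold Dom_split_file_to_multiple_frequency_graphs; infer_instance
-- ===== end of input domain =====

-- B replaces A's per-frequency rescan of the whole grid by pre-allocated all-'.' grids
-- plus one indexed pass writing each non-'.' char into its own frequency's grid (alternative decomposition, same result).

-- ===== PORT A =====
-- iterating a Python string yields its characters as 1-char strings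
def pvChars (line : String) : List String := line.toList.map (fun c => String.ofList [c])

def get_frequencies_list (file : List String) : List String :=
  file.foldl (fun acc line =>
    (pvChars line).foldl (fun acc ch =>
      if ¬ ch = "." ∧ ¬ ch ∈ acc then acc ++ [ch] else acc) acc) []

def split_file_to_multiple_frequency_graphs (file : List String) : List (String × List (List String)) :=
  let frequencies_list := get_frequencies_list file
  (frequencies_list.foldl (fun (d : PySem.Dict String (List (List String))) frequency =>
      d.insert frequency
        (file.foldl (fun current_graph line =>
            current_graph ++ [(pvChars line).foldl (fun new_line ch =>
                if ch = frequency then new_line ++ [ch] else new_line ++ ["."]) []])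
          [])) PySem.Dict.empty).items

-- ===== PORT B =====
-- indices produced by enumerate are ≥ 0, so `.toNat` is exact here (Python list assignment at a
-- nonnegative in-range index); the dict comprehension is ported as an insert fold over fresh keys.
def split_file_to_multiple_frequency_graphs_alt (file : List String) : List (String × List (List String)) :=
  let frequencies := get_frequencies_list file
  let d0 : PySem.Dict String (List (List String)) :=
    frequencies.foldl (fun d f =>
      d.insert f (file.map (fun line => (pvChars line).map (fun _ => ("." : String))))) PySem.Dict.empty
  ((PySem.List.enumerate file).foldl (fun d p =>
      (PySem.List.enumerate (pvChars p.2)).foldl (fun d q =>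
        if ¬ q.2 = "." then
          d.modify q.2 [] (fun g => g.set p.1.toNat ((g.getD p.1.toNat []).set q.1.toNat q.2))
        else d) d) d0).items

-- ===== PRECONDITION & SPEC =====
def Spec_split_file_to_multiple_frequency_graphs (file : List String) (out : List (String × List (List String))) : Prop := out = split_file_to_multiple_frequency_graphs_alt file
instance (file : List String) (out : List (String × List (List String))) : Decidable (Spec_split_file_to_multiple_frequency_graphs file out) := by unfold Spec_split_file_to_multiple_frequency_graphs; infer_instance

-- ===== CLAIM (what is proved, stated in full; the proofs are below) =====
def Claim_equal_split_file_to_multiple_frequency_graphs : Prop := ∀ (file : List String), Dom_split_file_to_multiple_frequency_graphs file → Spec_split_file_to_multiple_frequency_graphs file (split_file_to_multiple_frequency_graphs file)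

-- ===== LEMMAS AND PROOFS =====

-- the masked row / grid both programs produce for a frequency f
def pvMaskRow (f : String) (line : String) : List String :=
  (pvChars line).map (fun ch => if ch = f then ch else ".")

def pvGrid (f : String) (file : List String) : List (List String) := file.map (pvMaskRow f)

def pvBlank (file : List String) : List (List String) :=
  file.map (fun line => (pvChars line).map (fun _ => ("." : String)))

-- characterisation of get_frequencies_list: distinct, no ".", exactly the non-'.' chars
theorem gfl_char_mem (l : List String) (acc : List String) (x : String) :
    x ∈ l.foldl (fun acc ch => if ¬ ch = "." ∧ ¬ ch ∈ acc then acc ++ [ch] else acc) acc ↔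
      x ∈ acc ∨ (x ∈ l ∧ x ≠ ".") := by
  induction l generalizing acc with
  | nil => simp
  | cons c t ih =>
    simp only [List.foldl_cons, ih]
    by_cases hc : ¬ c = "." ∧ ¬ c ∈ acc <;> simp [hc] <;> by_cases hx : x = c <;> aesop

theorem gfl_char_nodup (l : List String) (acc : List String) (h : acc.Nodup) :
    (l.foldl (fun acc ch => if ¬ ch = "." ∧ ¬ ch ∈ acc then acc ++ [ch] else acc) acc).Nodup := by
  induction l generalizing acc with
  | nil => exact h
  | cons c t ih =>
    simp only [List.foldl_cons]
    by_cases hc : ¬ c = "." ∧ ¬ c ∈ acc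
    · simp only [hc]
      refine ih _ ?_
      simp [List.nodup_append, h]
      intro a ha heq
      exact hc.2 (heq ▸ ha)
    · simp only [hc, if_false]
      exact ih _ h

theorem gfl_file_mem (lines : List String) : ∀ (acc : List String) (x : String),
    x ∈ lines.foldl (fun acc line => (pvChars line).foldl
        (fun acc ch => if ¬ ch = "." ∧ ¬ ch ∈ acc then acc ++ [ch] else acc) acc) acc ↔
      x ∈ acc ∨ ((∃ line ∈ lines, x ∈ pvChars line) ∧ x ≠ ".") := by
  induction lines with
  | nil => simp
  | cons l t ih =>
    intro acc x
    simp only [List.foldl_cons, ih, gfl_char_mem]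
    aesop

theorem gfl_mem (file : List String) (x : String) :
    x ∈ get_frequencies_list file ↔ (∃ line ∈ file, x ∈ pvChars line) ∧ x ≠ "." := by
  rw [get_frequencies_list, gfl_file_mem]
  simp

theorem gfl_nodup (file : List String) : (get_frequencies_list file).Nodup := by
  rw [get_frequencies_list]
  have h : ∀ (lines : List String) (acc : List String), acc.Nodup →
      (lines.foldl (fun acc line => (pvChars line).foldl
        (fun acc ch => if ¬ ch = "." ∧ ¬ ch ∈ acc then acc ++ [ch] else acc) acc) acc).Nodup := by
    intro lines
    induction lines with
    | nil => exact fun acc h => h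
    | cons l t ih => exact fun acc h => ih _ (gfl_char_nodup _ _ h)
  exact h file [] List.nodup_nil

-- ----- A's result -----
theorem pv_buildRow_eq (f : String) (line : String) :
    (pvChars line).foldl (fun new_line ch =>
        if ch = f then new_line ++ [ch] else new_line ++ ["."]) [] = pvMaskRow f line := by
  have h : (fun (nl : List String) ch => if ch = f then nl ++ [ch] else nl ++ ["."]) =
      (fun nl ch => nl ++ [if ch = f then ch else "."]) := by
    funext nl ch; split <;> rfl
  rw [h, PySem.List.foldl_append_singleton_eq_map]; rfl

theorem pv_buildGrid_eq (f : String) (file : List String) :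
    file.foldl (fun current_graph line =>
        current_graph ++ [(pvChars line).foldl (fun new_line ch =>
            if ch = f then new_line ++ [ch] else new_line ++ ["."]) []]) [] = pvGrid f file := by
  have h : (fun (cg : List (List String)) line => cg ++ [(pvChars line).foldl (fun new_line ch =>
      if ch = f then new_line ++ [ch] else new_line ++ ["."]) []]) =
      (fun cg line => cg ++ [pvMaskRow f line]) := by
    funext cg line; rw [pv_buildRow_eq]
  rw [h, PySem.List.foldl_append_singleton_eq_map]; rfl

theorem pv_foldl_insert_items (freqs : List String) (v : String → List (List String))
    (h : freqs.Nodup) :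
    (freqs.foldl (fun (d : PySem.Dict String (List (List String))) f => d.insert f (v f))
        PySem.Dict.empty).items = freqs.map (fun f => (f, v f)) := by
  have := PySem.Dict.items_foldl_insert_fresh freqs id v PySem.Dict.empty
    (fun a _ => PySem.Dict.contains_empty a) (by simpa using h)
  simpa using this

theorem itemsA (file : List String) :
    split_file_to_multiple_frequency_graphs file =
      (get_frequencies_list file).map (fun f => (f, pvGrid f file)) := by
  show (List.foldl (fun (d : PySem.Dict String (List (List String))) frequency =>
      d.insert frequency (file.foldl (fun current_graph line =>
          current_graph ++ [(pvChars line).foldl (fun new_line ch =>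
              if ch = frequency then new_line ++ [ch] else new_line ++ ["."]) []]) []))
      PySem.Dict.empty (get_frequencies_list file)).items = _
  have h : (fun (d : PySem.Dict String (List (List String))) frequency =>
      d.insert frequency (file.foldl (fun current_graph line =>
          current_graph ++ [(pvChars line).foldl (fun new_line ch =>
              if ch = frequency then new_line ++ [ch] else new_line ++ ["."]) []]) [])) =
      (fun d f => d.insert f (pvGrid f file)) := by
    funext d f; rw [pv_buildGrid_eq]
  rw [h, pv_foldl_insert_items _ _ (gfl_nodup file)]

-- ----- B's per-key view of the fill pass -----
def pvLineFold (f : String) (cl : List (Int × String)) (r : List String) : List String :=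
  cl.foldl (fun r q => if q.2 = f then r.set q.1.toNat q.2 else r) r

def pvCellStep (f : String) (i : Int) (g : List (List String)) (cl : List (Int × String)) :
    List (List String) :=
  cl.foldl (fun g q =>
    if q.2 = f then g.set i.toNat ((g.getD i.toNat []).set q.1.toNat q.2) else g) g

def pvFillKey (f : String) (rl : List (Int × String)) (g : List (List String)) :
    List (List String) :=
  rl.foldl (fun g p => pvCellStep f p.1 g (PySem.List.enumerate (pvChars p.2) 0)) g

theorem pv_getD_set {α : Type} (l : List α) (n : Nat) (v : α) (k : Nat) (d : α) :
    (l.set n v).getD k d = if k = n ∧ n < l.length then v else l.getD k d := by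
  rcases Nat.lt_or_ge k l.length with h | h
  · rw [List.getD_eq_getElem _ _ (by simpa using h), List.getElem_set,
      List.getD_eq_getElem _ _ h]
    split_ifs <;> first | rfl | omega
  · have h2 : l.getD k d = d := List.getD_eq_default _ _ (by omega)
    have h3 : (l.set n v).getD k d = d := List.getD_eq_default _ _ (by simpa using h)
    rw [h2, h3]; split_ifs with hc <;> first | omega | rfl

-- dict-level: the fill pass, observed at one key f ≠ "."
theorem pv_getD_rowDict (f : String) (hf : ¬ f = ".") (i : Int) :
    ∀ (cl : List (Int × String)) (d : PySem.Dict String (List (List String))),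
    (cl.foldl (fun d q => if ¬ q.2 = "." then
        d.modify q.2 [] (fun g => g.set i.toNat ((g.getD i.toNat []).set q.1.toNat q.2))
      else d) d).getD f [] = pvCellStep f i (d.getD f []) cl := by
  intro cl
  induction cl with
  | nil => intro d; rfl
  | cons q t ih =>
    intro d
    simp only [List.foldl_cons, pvCellStep, List.foldl_cons] at *
    by_cases hq : q.2 = "."
    · rw [if_neg (by simp [hq]), if_neg (fun h => hf (h.symm.trans hq))]
      exact ih d
    · rw [if_pos hq, ih]
      congr 1
      rw [PySem.Dict.getD_modify]
      by_cases hfq : f = q.2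
      · rw [if_pos hfq, if_pos hfq.symm, hfq]
      · rw [if_neg hfq, if_neg (fun h => hfq h.symm)]

theorem pv_getD_fillDict (f : String) (hf : ¬ f = ".") :
    ∀ (rl : List (Int × String)) (d : PySem.Dict String (List (List String))),
    (rl.foldl (fun d p => (PySem.List.enumerate (pvChars p.2) 0).foldl (fun d q =>
        if ¬ q.2 = "." then
          d.modify q.2 [] (fun g => g.set p.1.toNat ((g.getD p.1.toNat []).set q.1.toNat q.2))
        else d) d) d).getD f [] = pvFillKey f rl (d.getD f []) := by
  intro rl
  induction rl with
  | nil => intro d; rfl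
  | cons p t ih =>
    intro d
    simp only [List.foldl_cons, pvFillKey, List.foldl_cons] at *
    rw [ih, pv_getD_rowDict f hf]

-- dict-level: the fill pass never changes the key list (every written key is present)
theorem pv_keys_rowDict (i : Int) :
    ∀ (cl : List (Int × String)) (d : PySem.Dict String (List (List String))),
    (∀ q ∈ cl, ¬ q.2 = "." → q.2 ∈ d.keys) →
    (cl.foldl (fun d q => if ¬ q.2 = "." then
        d.modify q.2 [] (fun g => g.set i.toNat ((g.getD i.toNat []).set q.1.toNat q.2))
      else d) d).keys = d.keys := by
  intro cl
  induction cl with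
  | nil => intro d _; rfl
  | cons q t ih =>
    intro d hmem
    simp only [List.foldl_cons]
    by_cases hq : q.2 = "."
    · rw [if_neg (by simp [hq])]
      exact ih d (fun q' hq' => hmem q' (List.mem_cons_of_mem _ hq'))
    · rw [if_pos hq]
      have hk : (d.modify q.2 [] (fun g => g.set i.toNat ((g.getD i.toNat []).set q.1.toNat q.2))).keys = d.keys := by
        rw [PySem.Dict.keys_modify,
          PySem.Dict.keys_insert_of_contains _ _ (by
            rw [PySem.Dict.contains_eq_decide_mem_keys]
            simpa using hmem q (List.mem_cons_self) hq)]
      rw [← hk] at hmem ⊢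
      exact ih _ (fun q' hq' => hmem q' (List.mem_cons_of_mem _ hq'))

theorem pv_keys_fillDict :
    ∀ (rl : List (Int × String)) (d : PySem.Dict String (List (List String))),
    (∀ p ∈ rl, ∀ q ∈ PySem.List.enumerate (pvChars p.2) 0, ¬ q.2 = "." → q.2 ∈ d.keys) →
    (rl.foldl (fun d p => (PySem.List.enumerate (pvChars p.2) 0).foldl (fun d q =>
        if ¬ q.2 = "." then
          d.modify q.2 [] (fun g => g.set p.1.toNat ((g.getD p.1.toNat []).set q.1.toNat q.2))
        else d) d) d).keys = d.keys := by
  intro rl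
  induction rl with
  | nil => intro d _; rfl
  | cons p t ih =>
    intro d hmem
    simp only [List.foldl_cons]
    have hk := pv_keys_rowDict p.1 (PySem.List.enumerate (pvChars p.2) 0) d
      (fun q hq => hmem p List.mem_cons_self q hq)
    rw [← hk] at hmem
    rw [ih _ (fun p' hp' => hmem p' (List.mem_cons_of_mem _ hp')), hk]

-- cell steps at row i rewrite row i only
theorem pv_cellStep_eq_set (f : String) (i : Int) :
    ∀ (cl : List (Int × String)) (g : List (List String)), i.toNat < g.length →
    pvCellStep f i g cl = g.set i.toNat (pvLineFold f cl (g.getD i.toNat [])) := by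
  intro cl
  induction cl with
  | nil =>
    intro g hg
    rw [pvCellStep, List.foldl_nil, pvLineFold, List.foldl_nil,
      List.getD_eq_getElem _ _ hg, List.set_getElem_self]
  | cons q t ih =>
    intro g hg
    simp only [pvCellStep, List.foldl_cons, pvLineFold] at *
    by_cases hq : q.2 = f
    · rw [if_pos hq, if_pos hq,
        ih _ (by simpa using hg)]
      rw [pv_getD_set, if_pos ⟨rfl, hg⟩, List.set_set]
    · rw [if_neg hq, if_neg hq, ih _ hg]

-- the per-row fold, characterised pointwise
theorem pv_lineFold_enum (f : String) (chars : List String) :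
    ∀ (s : Nat) (r : List String),
    (pvLineFold f (PySem.List.enumerate chars (s : Int)) r).length = r.length ∧
    ∀ m, m < r.length →
      (pvLineFold f (PySem.List.enumerate chars (s : Int)) r).getD m "" =
        if s ≤ m ∧ m - s < chars.length ∧ chars.getD (m - s) "" = f then f
        else r.getD m "" := by
  induction chars with
  | nil =>
    intro s r
    rw [pvLineFold, PySem.List.enumerate_nil, List.foldl_nil]
    exact ⟨rfl, fun m _ => by rw [if_neg (by rintro ⟨_, h2, _⟩; simp at h2)]⟩
  | cons c rest ih =>
    intro s r
    rw [pvLineFold, PySem.List.enumerate_cons, List.foldl_cons]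
    have hcast : (s : Int) + 1 = ((s + 1 : Nat) : Int) := by push_cast; ring
    by_cases hc : c = f
    · rw [if_pos hc, hcast]
      dsimp only
      simp only [Int.toNat_natCast]
      obtain ⟨ihlen, ihval⟩ := ih (s + 1) (r.set (s : Int).toNat c)
      rw [pvLineFold] at ihlen ihval
      simp only [Int.toNat_natCast] at ihlen ihval
      refine ⟨by rw [ihlen]; simp, ?_⟩
      intro m hm
      rw [ihval m (by simpa using hm), pv_getD_set]
      rcases Nat.lt_trichotomy m s with h | h | h
      · rw [if_neg (by rintro ⟨h1, -, -⟩; omega), if_neg (by rintro ⟨h1, -⟩; omega),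
          if_neg (by rintro ⟨h1, -, -⟩; omega)]
      · rw [if_neg (by rintro ⟨h1, -, -⟩; omega), if_pos ⟨h, by omega⟩,
          if_pos ⟨by omega, by simp; omega,
            by rw [show m - s = 0 from by omega, List.getD_cons_zero]; exact hc⟩]
        exact hc
      · have he : m - s = (m - (s + 1)) + 1 := by omega
        by_cases hin : s + 1 ≤ m ∧ m - (s + 1) < rest.length ∧ rest.getD (m - (s + 1)) "" = f
        · obtain ⟨hin1, hin2, hin3⟩ := hin
          rw [if_pos ⟨hin1, hin2, hin3⟩,
            if_pos ⟨by omega, by simp; omega, by rw [he, List.getD_cons_succ]; exact hin3⟩]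
        · rw [if_neg hin, if_neg (by rintro ⟨h1, -⟩; omega), if_neg (by
            rintro ⟨h1, h2, h3⟩
            rw [he, List.getD_cons_succ] at h3
            exact hin ⟨by omega, by simp at h2; omega, h3⟩)]
    · rw [if_neg hc, hcast]
      obtain ⟨ihlen, ihval⟩ := ih (s + 1) r
      rw [pvLineFold] at ihlen ihval
      refine ⟨ihlen, ?_⟩
      intro m hm
      rw [ihval m hm]
      rcases Nat.lt_trichotomy m s with h | h | h
      · rw [if_neg (by rintro ⟨h1, -, -⟩; omega), if_neg (by rintro ⟨h1, -, -⟩; omega)]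
      · rw [if_neg (by rintro ⟨h1, -, -⟩; omega), if_neg (by
          rintro ⟨-, -, h3⟩
          rw [show m - s = 0 from by omega, List.getD_cons_zero] at h3
          exact hc h3)]
      · have he : m - s = (m - (s + 1)) + 1 := by omega
        by_cases hin : s + 1 ≤ m ∧ m - (s + 1) < rest.length ∧ rest.getD (m - (s + 1)) "" = f
        · obtain ⟨hin1, hin2, hin3⟩ := hin
          rw [if_pos ⟨hin1, hin2, hin3⟩,
            if_pos ⟨by omega, by simp; omega, by rw [he, List.getD_cons_succ]; exact hin3⟩]
        · rw [if_neg hin, if_neg (by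
            rintro ⟨h1, h2, h3⟩
            rw [he, List.getD_cons_succ] at h3
            exact hin ⟨by omega, by simp at h2; omega, h3⟩)]

-- the whole fill for one key, characterised row by row
theorem pv_fillKey_enum (f : String) (rows : List String) :
    ∀ (s : Nat) (g : List (List String)), s + rows.length ≤ g.length →
    (pvFillKey f (PySem.List.enumerate rows (s : Int)) g).length = g.length ∧
    ∀ k, k < g.length →
      (pvFillKey f (PySem.List.enumerate rows (s : Int)) g).getD k [] =
        if s ≤ k ∧ k - s < rows.length then
          pvLineFold f (PySem.List.enumerate (pvChars (rows.getD (k - s) "")) 0) (g.getD k [])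
        else g.getD k [] := by
  induction rows with
  | nil =>
    intro s g _
    rw [pvFillKey, PySem.List.enumerate_nil, List.foldl_nil]
    exact ⟨rfl, fun k _ => by rw [if_neg (by rintro ⟨_, h2⟩; simp at h2)]⟩
  | cons line rest ih =>
    intro s g hlen
    simp only [List.length_cons] at hlen
    rw [pvFillKey, PySem.List.enumerate_cons, List.foldl_cons]
    dsimp only
    have hcast : (s : Int) + 1 = ((s + 1 : Nat) : Int) := by push_cast; ring
    have hslt : (s : Int).toNat < g.length := by simp; omega
    rw [pv_cellStep_eq_set f _ _ _ hslt, hcast]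
    simp only [Int.toNat_natCast] at *
    set v := pvLineFold f (PySem.List.enumerate (pvChars line) 0) (g.getD s []) with hv
    obtain ⟨ihlen, ihval⟩ := ih (s + 1) (g.set s v) (by simp; omega)
    rw [pvFillKey] at ihlen ihval
    refine ⟨by rw [ihlen]; simp, ?_⟩
    intro k hk
    have hvk := ihval k (by simpa using hk)
    rcases Nat.lt_trichotomy k s with h | h | h
    · have hst : (g.set s v).getD k [] = g.getD k [] := by
        rw [pv_getD_set, if_neg (by rintro ⟨h1, -⟩; omega)]
      rw [hst] at hvk
      rw [hvk, if_neg (by rintro ⟨h1, -⟩; omega), if_neg (by rintro ⟨h1, -⟩; omega)]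
    · have hst : (g.set s v).getD k [] = v := by
        rw [pv_getD_set, if_pos ⟨h, by omega⟩]
      rw [hst] at hvk
      rw [hvk, if_neg (by rintro ⟨h1, -⟩; omega),
        if_pos ⟨by omega, by simp only [List.length_cons]; omega⟩,
        show k - s = 0 from by omega, List.getD_cons_zero, hv, h]
    · have hst : (g.set s v).getD k [] = g.getD k [] := by
        rw [pv_getD_set, if_neg (by rintro ⟨h1, -⟩; omega)]
      rw [hst] at hvk
      have he : k - s = (k - (s + 1)) + 1 := by omega
      by_cases hin : s + 1 ≤ k ∧ k - (s + 1) < rest.length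
      · obtain ⟨hin1, hin2⟩ := hin
        rw [hvk, if_pos ⟨hin1, hin2⟩,
          if_pos ⟨by omega, by simp only [List.length_cons]; omega⟩, he, List.getD_cons_succ]
      · rw [hvk, if_neg hin, if_neg (by
          rintro ⟨h1, h2⟩
          simp only [List.length_cons] at h2
          exact hin ⟨by omega, by omega⟩)]

-- one key's final grid is the masked grid
theorem pv_lineFold_blank (f : String) (line : String) :
    pvLineFold f (PySem.List.enumerate (pvChars line) 0)
        ((pvChars line).map (fun _ => ("." : String))) = pvMaskRow f line := by
  obtain ⟨hlen, hval⟩ := pv_lineFold_enum f (pvChars line) 0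
    ((pvChars line).map (fun _ => ("." : String)))
  have h0 : ((0 : Nat) : Int) = (0 : Int) := rfl
  rw [h0] at hlen hval
  apply List.ext_getElem (by rw [hlen]; simp [pvMaskRow])
  intro m h1 h2
  have hm : m < ((pvChars line).map (fun _ => ("." : String))).length := by
    simp [pvMaskRow] at h2 ⊢; exact h2
  rw [← List.getD_eq_getElem _ "" h1, hval m hm]
  have hmc : m < (pvChars line).length := by simpa using hm
  have hmask : (pvMaskRow f line)[m] = if (pvChars line)[m] = f then (pvChars line)[m] else "." := by
    simp [pvMaskRow]
  rw [hmask]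
  by_cases hc : (pvChars line)[m] = f
  · rw [if_pos ⟨Nat.zero_le _, by simpa using hmc, by
      rw [Nat.sub_zero, List.getD_eq_getElem _ _ hmc]; exact hc⟩, if_pos hc, hc]
  · rw [if_neg (by
      rintro ⟨_, _, h3⟩
      rw [Nat.sub_zero, List.getD_eq_getElem _ _ hmc] at h3
      exact hc h3), if_neg hc]
    rw [List.getD_eq_getElem _ _ hm]
    simp

theorem pv_fillKey_blank (f : String) (file : List String) :
    pvFillKey f (PySem.List.enumerate file 0) (pvBlank file) = pvGrid f file := by
  obtain ⟨hlen, hval⟩ := pv_fillKey_enum f file 0 (pvBlank file) (by simp [pvBlank])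
  have h0 : ((0 : Nat) : Int) = (0 : Int) := rfl
  rw [h0] at hlen hval
  apply List.ext_getElem (by rw [hlen]; simp [pvBlank, pvGrid])
  intro k h1 h2
  have hkf : k < file.length := by simpa [pvGrid] using h2
  have hk : k < (pvBlank file).length := by simpa [pvBlank] using hkf
  rw [← List.getD_eq_getElem _ [] h1, hval k hk,
    if_pos ⟨Nat.zero_le _, by simpa using hkf⟩]
  have hrow : (pvBlank file).getD k [] = (pvChars (file.getD k "")).map (fun _ => ("." : String)) := by
    rw [List.getD_eq_getElem _ _ hk, List.getD_eq_getElem _ _ hkf]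
    simp [pvBlank]
  rw [Nat.sub_zero, hrow, pv_lineFold_blank]
  rw [List.getD_eq_getElem _ _ hkf]
  simp [pvGrid]

-- ----- main equivalence -----
theorem pv_main (file : List String) :
    split_file_to_multiple_frequency_graphs file =
      split_file_to_multiple_frequency_graphs_alt file := by
  have hnd := gfl_nodup file
  -- the initial dict of blank grids
  have hd0items : ((get_frequencies_list file).foldl
      (fun (d : PySem.Dict String (List (List String))) f => d.insert f (pvBlank file))
      PySem.Dict.empty).items = (get_frequencies_list file).map (fun f => (f, pvBlank file)) :=
    pv_foldl_insert_items _ _ hnd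
  set d0 : PySem.Dict String (List (List String)) := (get_frequencies_list file).foldl
      (fun d f => d.insert f (pvBlank file)) PySem.Dict.empty with hd0
  have hd0keys : d0.keys = get_frequencies_list file := by
    show d0.items.map Prod.fst = _
    rw [hd0items, List.map_map,
      show (Prod.fst ∘ fun f : String => (f, pvBlank file)) = id from rfl, List.map_id]
  have hd0nodup : d0.keys.Nodup := by rw [hd0keys]; exact hnd
  -- the filled dict
  set dfin : PySem.Dict String (List (List String)) := (PySem.List.enumerate file 0).foldl
      (fun d p => (PySem.List.enumerate (pvChars p.2) 0).foldl (fun d q =>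
        if ¬ q.2 = "." then
          d.modify q.2 [] (fun g => g.set p.1.toNat ((g.getD p.1.toNat []).set q.1.toNat q.2))
        else d) d) d0 with hdfin
  have hmemkeys : ∀ p ∈ PySem.List.enumerate file 0, ∀ q ∈ PySem.List.enumerate (pvChars p.2) 0,
      ¬ q.2 = "." → q.2 ∈ d0.keys := by
    intro p hp q hq hne
    rw [hd0keys, gfl_mem]
    rw [PySem.List.mem_enumerate_iff] at hp hq
    obtain ⟨kp, hkp, hpe⟩ := hp
    obtain ⟨kq, hkq, hqe⟩ := hq
    refine ⟨⟨p.2, by rw [hpe]; exact List.getElem_mem _, by rw [hqe]; exact List.getElem_mem _⟩, hne⟩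
  have hkeys : dfin.keys = get_frequencies_list file := by
    rw [hdfin, pv_keys_fillDict _ _ hmemkeys, hd0keys]
  have hknd : dfin.keys.Nodup := by rw [hkeys]; exact hnd
  have hitems : dfin.items = dfin.keys.map (fun k => (k, dfin.getD k [])) :=
    PySem.Dict.items_eq_map_keys dfin hknd []
  have hval : ∀ f ∈ get_frequencies_list file, dfin.getD f [] = pvGrid f file := by
    intro f hfm
    have hfne : ¬ f = "." := ((gfl_mem file f).mp hfm).2
    have hd0get : d0.getD f [] = pvBlank file := by
      refine PySem.Dict.getD_of_mem_items d0 ?_ hd0nodup []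
      rw [hd0items]
      exact List.mem_map.mpr ⟨f, hfm, rfl⟩
    rw [hdfin, pv_getD_fillDict f hfne, hd0get, pv_fillKey_blank]
  rw [itemsA]
  show _ = dfin.items
  rw [hitems, hkeys]
  exact (List.map_congr_left (fun f hfm => by rw [hval f hfm])).symm

-- ===== VERDICT (by name: the statement is the Claim_ definition above) =====
theorem split_file_to_multiple_frequency_graphs_spec : Claim_equal_split_file_to_multiple_frequency_graphs := by
  intro file _
  show _ = _
  exact pv_main file
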